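-- pv_equiv track=rewrite | github.com/NINGNINGSHINIAN/YaSheng | 贪心法/Saruman's Army.py | solve
-- ===== SOURCE A (Python) =====
-- def solve(R, X):
--     X = sorted(X)
--     mark = [0] * len(X)
--     i = 0
--
--     while i < len(X):
--         s = X[i]
--         i = i + 1
--         while i < len(X) and X[i] <= s + R:
--             i += 1
--         p = X[i - 1]
--         mark[i - 1] = 1
--         while i < len(X) and X[i] <= p + R:
--             i += 1
--
--     return mark
-- ===== SOURCE B (Python) =====
-- def _prefix_le(ys, bound):
--     # longest prefix of ys whose elements are <= bound
--     pre = []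
--     for y in ys:
--         if bound < y:
--             break
--         pre.append(y)
--     return pre
--
--
-- def solve(R, X):
--     ys = sorted(X)
--     out = []
--     while ys:
--         s, tail = ys[0], ys[1:]
--         near = _prefix_le(tail, s + R)          # points within R of the first uncovered point
--         p = near[-1] if near else s             # mark the farthest such point
--         rest = tail[len(near):]
--         far = _prefix_le(rest, p + R)           # points covered by the marked point
--         out += [0] * len(near) + [1] + [0] * len(far)
--         ys = rest[len(far):]
--     return out
-- ===== Notes on version B (the rewrite author's own statement) =====
-- stated objective: alternative
-- what changed: Instead of A's index-driven while-loop that mutates a pre-allocated mark array in place via nested index scans, B recurses over list suffixes: it splits off the prefix within R of the first uncovered point and the prefix covered by the marked point, and builds the answer by concatenating [0]*k+[1]+[0]*m chunks, with no indices and no mark array.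
import Mathlib
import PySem

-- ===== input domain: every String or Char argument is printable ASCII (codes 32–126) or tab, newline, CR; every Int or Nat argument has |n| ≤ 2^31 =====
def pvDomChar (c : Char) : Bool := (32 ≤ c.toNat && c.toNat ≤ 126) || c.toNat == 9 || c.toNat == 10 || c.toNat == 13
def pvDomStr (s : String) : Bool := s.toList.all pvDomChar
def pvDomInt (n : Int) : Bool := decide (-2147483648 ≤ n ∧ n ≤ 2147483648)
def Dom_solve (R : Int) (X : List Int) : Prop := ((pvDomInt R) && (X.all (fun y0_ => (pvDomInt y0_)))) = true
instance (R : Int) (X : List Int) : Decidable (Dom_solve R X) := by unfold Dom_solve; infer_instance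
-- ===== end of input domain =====

-- B rebuilds the greedy cover by structural recursion over list suffixes, concatenating
-- [0]*k ++ [1] ++ [0]*m chunks, instead of A's index loop mutating a mark array; alternative decomposition.


-- ===== PORT A =====
-- inner `while i < len(X) and X[i] <= key: i += 1` of A (both inner loops have this shape);
-- indices stay in range, so in-range X[i] is X.getD i 0 exactly; the fuel argument only
-- makes the loop structurally recursive (X.length - i always suffices)
def scanAGo : Nat → List Int → Int → Nat → Nat
  | 0, _, _, i => i
  | fuel + 1, X, key, i =>
      if i < X.length ∧ X.getD i 0 ≤ key then scanAGo fuel X key (i + 1) else i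

def scanA (X : List Int) (key : Int) (i : Nat) : Nat := scanAGo (X.length - i) X key i

-- A's outer while-loop over the sorted list: s = X[i]; scan past s+R; mark; scan past p+R
def loopAGo : Nat → Int → List Int → List Int → Nat → List Int
  | 0, _, _, mark, _ => mark
  | fuel + 1, R, X, mark, i =>
      if i < X.length then
        loopAGo fuel R X (mark.set (scanA X (X.getD i 0 + R) (i + 1) - 1) 1)
          (scanA X (X.getD (scanA X (X.getD i 0 + R) (i + 1) - 1) 0 + R)
            (scanA X (X.getD i 0 + R) (i + 1)))
      else mark

def loopA (R : Int) (X : List Int) (mark : List Int) (i : Nat) : List Int :=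
  loopAGo (X.length - i) R X mark i

def solve (R : Int) (X : List Int) : List Int :=
  let XS := PySem.List.sorted X (fun x => x) false
  loopA R XS (List.replicate XS.length 0) 0

-- ===== PORT B =====
-- Source B's _prefix_le: longest prefix of ys whose elements are ≤ bound
def prefixLe : List Int → Int → List Int
  | [], _ => []
  | y :: ys, b => if b < y then [] else y :: prefixLe ys b

theorem prefixLe_length_le (ys : List Int) (b : Int) : (prefixLe ys b).length ≤ ys.length := by
  induction ys with
  | nil => simp [prefixLe]
  | cons y t ih =>
      simp only [prefixLe]
      split
      · simp
      · simpa using Nat.succ_le_succ ih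

-- Source B's while-loop over shrinking suffixes: split off `near` and `far`, emit one chunk, recurse
def chunksB (R : Int) : List Int → List Int
  | [] => []
  | s :: tail =>
      let near := prefixLe tail (s + R)
      let rest := tail.drop near.length
      let far := prefixLe rest (near.getLastD s + R)
      List.replicate near.length 0 ++ [1] ++ List.replicate far.length 0 ++
        chunksB R (rest.drop far.length)
termination_by ys => ys.length
decreasing_by
  have h1 := prefixLe_length_le tail (s + R)
  simp only [List.length_drop, List.length_cons]
  omega

def solve_alt (R : Int) (X : List Int) : List Int :=
  chunksB R (PySem.List.sorted X (fun x => x) false)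

-- ===== PRECONDITION & SPEC =====
def Spec_solve (R : Int) (X : List Int) (out : List Int) : Prop := out = solve_alt R X
instance (R : Int) (X : List Int) (out : List Int) : Decidable (Spec_solve R X out) := by unfold Spec_solve; infer_instance

-- ===== CLAIM (what is proved, stated in full; the proofs are below) =====
def Claim_equal_solve : Prop := ∀ (R : Int) (X : List Int), Dom_solve R X → Spec_solve R X (solve R X)

-- ===== LEMMAS AND PROOFS =====

theorem scanAGo_ge (f : Nat) (X : List Int) (key : Int) (i : Nat) : i ≤ scanAGo f X key i := by
  induction f generalizing i with
  | zero => exact Nat.le_refl i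
  | succ g ih =>
      simp only [scanAGo]
      split
      · have := ih (i + 1); omega
      · exact Nat.le_refl i

theorem scanA_ge (X : List Int) (key : Int) (i : Nat) : i ≤ scanA X key i := scanAGo_ge _ X key i

theorem scanA_eq (X : List Int) (key : Int) (i : Nat) :
    scanA X key i = if i < X.length ∧ X.getD i 0 ≤ key then scanA X key (i + 1) else i := by
  unfold scanA
  cases hf : X.length - i with
  | zero =>
      rw [if_neg (fun hc => absurd hc.1 (by omega))]
      rfl
  | succ g =>
      simp only [scanAGo]
      by_cases hc : i < X.length ∧ X.getD i 0 ≤ key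
      · rw [if_pos hc, if_pos hc, (by omega : g = X.length - (i + 1))]
      · rw [if_neg hc, if_neg hc]

theorem loopAGo_congr (f1 : Nat) (R : Int) (X : List Int) :
    ∀ f2 mark i, X.length - i ≤ f1 → X.length - i ≤ f2 →
    loopAGo f1 R X mark i = loopAGo f2 R X mark i := by
  induction f1 generalizing R X with
  | zero =>
      intro f2 mark i h1 h2
      cases f2 with
      | zero => rfl
      | succ g2 => simp only [loopAGo]; rw [if_neg (by omega)]
  | succ g1 ih =>
      intro f2 mark i h1 h2
      cases f2 with
      | zero => simp only [loopAGo]; rw [if_neg (by omega)]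
      | succ g2 =>
          simp only [loopAGo]
          by_cases h : i < X.length
          · rw [if_pos h, if_pos h]
            have hg := scanA_ge X (X.getD i 0 + R) (i + 1)
            have hg2 := scanA_ge X (X.getD (scanA X (X.getD i 0 + R) (i + 1) - 1) 0 + R)
                (scanA X (X.getD i 0 + R) (i + 1))
            exact ih R X g2 _ _ (by omega) (by omega)
          · rw [if_neg h, if_neg h]

theorem loopA_eq (R : Int) (X : List Int) (mark : List Int) (i : Nat) :
    loopA R X mark i =
      if i < X.length then
        loopA R X (mark.set (scanA X (X.getD i 0 + R) (i + 1) - 1) 1)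
          (scanA X (X.getD (scanA X (X.getD i 0 + R) (i + 1) - 1) 0 + R)
            (scanA X (X.getD i 0 + R) (i + 1)))
      else mark := by
  unfold loopA
  cases hf : X.length - i with
  | zero => rw [if_neg (by omega)]; rfl
  | succ g =>
      simp only [loopAGo]
      rw [if_pos (by omega : i < X.length), if_pos (by omega : i < X.length)]
      have hg := scanA_ge X (X.getD i 0 + R) (i + 1)
      have hg2 := scanA_ge X (X.getD (scanA X (X.getD i 0 + R) (i + 1) - 1) 0 + R)
          (scanA X (X.getD i 0 + R) (i + 1))
      exact loopAGo_congr g R X _ _ _ (by omega) (by omega)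

-- prefixLe is a prefix of its argument
theorem prefixLe_isPrefix (ys : List Int) (b : Int) : prefixLe ys b <+: ys := by
  induction ys with
  | nil => simp [prefixLe]
  | cons y t ih =>
      simp only [prefixLe]
      split
      · exact List.nil_prefix
      · exact List.cons_prefix_cons.mpr ⟨rfl, ih⟩

-- A's inner scan from lo equals lo plus the length of B's prefix split of the suffix
theorem scanA_prefixLe (X : List Int) (key : Int) (lo : Nat) :
    scanA X key lo = lo + (prefixLe (X.drop lo) key).length := by
  rw [scanA_eq]
  by_cases h : lo < X.length
  · have hdrop : X.drop lo = X.getD lo 0 :: X.drop (lo + 1) := by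
      rw [List.getD_eq_getElem X 0 h]
      exact (List.drop_eq_getElem_cons h)
    rw [hdrop]
    simp only [prefixLe]
    by_cases hk : X.getD lo 0 ≤ key
    · rw [if_pos ⟨h, hk⟩, if_neg (not_lt.mpr hk)]
      rw [scanA_prefixLe X key (lo + 1)]
      simp only [List.length_cons]; omega
    · rw [if_neg (fun hc => hk hc.2), if_pos (not_le.mp hk)]
      simp
  · rw [if_neg (fun hc => h hc.1), List.drop_eq_nil_of_le (by omega)]
    simp [prefixLe]
termination_by X.length - lo
decreasing_by omega

-- the element A marks is B's getLastD of near
theorem getD_prefixLe_last (X : List Int) (b : Int) (i : Nat) (hi : i < X.length) :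
    X.getD (i + (prefixLe (X.drop (i + 1)) b).length) 0 =
      (prefixLe (X.drop (i + 1)) b).getLastD (X.getD i 0) := by
  set l := prefixLe (X.drop (i + 1)) b with hl
  cases hk : l.length with
  | zero =>
      rw [List.length_eq_zero_iff.mp hk]
      simp
  | succ m =>
      have hpre : l <+: X.drop (i + 1) := prefixLe_isPrefix (X.drop (i + 1)) b
      have hlenle : l.length ≤ X.length - (i + 1) := by
        have := prefixLe_length_le (X.drop (i + 1)) b
        rw [List.length_drop] at this
        rw [hl]; exact this
      have hm : m < l.length := by omega
      have hmd : m < (X.drop (i + 1)).length := by rw [List.length_drop]; omega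
      have hgl : l[m]'hm = (X.drop (i + 1))[m]'hmd := List.IsPrefix.getElem hpre hm
      rw [List.getLastD_eq_getLast?, List.getLast?_eq_getElem?, hk]
      simp only [Nat.add_sub_cancel]
      rw [List.getElem?_eq_getElem hm]
      simp only [Option.getD_some]
      rw [hgl, List.getElem_drop]
      rw [List.getD_eq_getElem X 0 (by omega)]
      congr 1
      omega

-- replicate with one 1 set splits into chunk form
theorem replicate_set (m k : Nat) (hk : k < m) :
    (List.replicate m (0 : Int)).set k 1 =
      List.replicate k 0 ++ [1] ++ List.replicate (m - k - 1) 0 := by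
  induction k generalizing m with
  | zero =>
      cases m with
      | zero => omega
      | succ m' => simp [List.replicate_succ]
  | succ k' ih =>
      cases m with
      | zero => omega
      | succ m' =>
          have hstep : (List.replicate (m' + 1) (0 : Int)).set (k' + 1) 1 =
              0 :: (List.replicate m' (0 : Int)).set k' 1 := rfl
          rw [hstep, ih m' (by omega)]
          simp [List.replicate_succ]

-- main invariant: A's loop from i over mark = M ++ zeros equals M ++ B's chunks of the suffix
theorem loopA_chunksB (R : Int) (X : List Int) (i : Nat) (M : List Int)
    (hM : M.length = i) (hi : i ≤ X.length) :
    loopA R X (M ++ List.replicate (X.length - i) 0) i = M ++ chunksB R (X.drop i) := by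
  rw [loopA_eq]
  by_cases h : i < X.length
  · rw [if_pos h]
    have hdrop : X.drop i = X.getD i 0 :: X.drop (i + 1) := by
      rw [List.getD_eq_getElem X 0 h]
      exact (List.drop_eq_getElem_cons h)
    set near := prefixLe (X.drop (i + 1)) (X.getD i 0 + R) with hnear
    have hnlen : near.length ≤ X.length - (i + 1) := by
      have := prefixLe_length_le (X.drop (i + 1)) (X.getD i 0 + R)
      rw [List.length_drop] at this; omega
    have hscan1 : scanA X (X.getD i 0 + R) (i + 1) = i + 1 + near.length := by
      rw [scanA_prefixLe]
    have hj : scanA X (X.getD i 0 + R) (i + 1) - 1 = i + near.length := by omega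
    have hp : X.getD (i + near.length) 0 = near.getLastD (X.getD i 0) :=
      getD_prefixLe_last X (X.getD i 0 + R) i h
    set p := near.getLastD (X.getD i 0) with hpdef
    have hXj : X.drop (i + 1 + near.length) = (X.drop (i + 1)).drop near.length := by
      rw [List.drop_drop]
    set far := prefixLe ((X.drop (i + 1)).drop near.length) (p + R) with hfar
    have hflen : far.length ≤ X.length - (i + 1) - near.length := by
      have := prefixLe_length_le ((X.drop (i + 1)).drop near.length) (p + R)
      simp only [List.length_drop] at this; omega
    have hscan2 : scanA X (p + R) (i + 1 + near.length) = i + 1 + near.length + far.length := by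
      rw [scanA_prefixLe, hXj]
    -- rewrite the mark update
    have hset : (M ++ List.replicate (X.length - i) 0).set (i + near.length) 1 =
        (M ++ List.replicate near.length 0 ++ [1] ++ List.replicate far.length 0) ++
          List.replicate (X.length - (i + 1 + near.length + far.length)) 0 := by
      rw [List.set_append_right _ _ (by omega)]
      rw [hM, Nat.add_sub_cancel_left]
      rw [replicate_set (X.length - i) near.length (by omega)]
      have hsplit : X.length - i - near.length - 1 =
          far.length + (X.length - (i + 1 + near.length + far.length)) := by omega
      rw [hsplit, List.replicate_add]
      simp [List.append_assoc]
    rw [hj, hp, hscan1, hscan2, hset]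
    have hrec := loopA_chunksB R X (i + 1 + near.length + far.length)
        (M ++ List.replicate near.length 0 ++ [1] ++ List.replicate far.length 0)
        (by simp [hM]; omega) (by omega)
    rw [hrec]
    -- unfold one step of chunksB on the suffix
    conv_rhs => rw [hdrop, chunksB]
    simp only [← hnear]
    rw [show (X.drop (i+1)).drop near.length = X.drop (i + 1 + near.length) from hXj.symm]
    simp only [← hpdef]
    rw [show prefixLe (X.drop (i + 1 + near.length)) (p + R) = far by rw [hfar, hXj]]
    rw [show (X.drop (i + 1 + near.length)).drop far.length =
          X.drop (i + 1 + near.length + far.length) by rw [List.drop_drop]]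
    simp [List.append_assoc]
  · rw [if_neg h]
    have : i = X.length := by omega
    subst this
    rw [List.drop_length, Nat.sub_self, chunksB]
    simp
termination_by X.length - i
decreasing_by omega

-- ===== VERDICT (by name: the statement is the Claim_ definition above) =====
theorem solve_spec : Claim_equal_solve := by
  intro R X _
  unfold Spec_solve solve solve_alt
  have := loopA_chunksB R (PySem.List.sorted X (fun x => x) false) 0 [] rfl (Nat.zero_le _)
  simpa using this
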